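-- pv_equiv track=rewrite | github.com/Marty42780/NSI-1ere | 08-Traitement_de_Donnees_en_Tables_Eleves/Activité-2/etude_detectionParticules.py | ligneSur10
-- ===== SOURCE A (Python) =====
-- def ligneSur10(fichier):
--     """Give 1 row out of 10 in fichier """
--     i=1
--     result = []
--     for ligne in fichier:
--         if i % 10==0:
--             result += ligne
--         i+=1
--     return result
-- ===== SOURCE B (Python) =====
-- def ligneSur10(fichier):
--     """Give 1 row out of 10 in fichier """
--     lines = list(fichier)
--     return [c for line in lines[9::10] for c in line]
-- ===== Notes on version B (the rewrite author's own statement) =====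
-- stated objective: idiomatic
-- what changed: Replaces the explicit counter-and-modulo loop with materializing the file and stride slicing [9::10], flattening the selected lines with a nested comprehension.
import Mathlib
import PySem

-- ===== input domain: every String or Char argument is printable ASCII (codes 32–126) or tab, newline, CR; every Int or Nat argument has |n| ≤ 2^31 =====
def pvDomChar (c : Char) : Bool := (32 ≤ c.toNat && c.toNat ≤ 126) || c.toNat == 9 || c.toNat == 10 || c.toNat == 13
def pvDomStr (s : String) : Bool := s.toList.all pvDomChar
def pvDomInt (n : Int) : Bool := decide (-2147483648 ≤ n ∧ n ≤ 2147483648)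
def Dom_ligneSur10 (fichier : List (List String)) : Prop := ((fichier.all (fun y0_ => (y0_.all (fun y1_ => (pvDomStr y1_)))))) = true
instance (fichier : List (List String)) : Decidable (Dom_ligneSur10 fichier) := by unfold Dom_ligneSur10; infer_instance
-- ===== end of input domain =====

-- B replaces A's explicit counter-and-modulo loop with stride slicing [9::10] plus a
-- flattening comprehension (idiomatic; same O(n) cost).
-- ===== PORT A =====
-- A: counter i starting at 1; lines whose 1-based index is a multiple of 10 are
-- flattened (result += ligne) into the accumulator.
def ligneSur10 (fichier : List (List String)) : List String :=
  (fichier.foldl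
    (fun (st : Nat × List String) ligne =>
      (st.1 + 1, if st.1 % 10 == 0 then st.2 ++ ligne else st.2))
    (1, [])).2

-- ===== PORT B =====
-- B: materialize, stride-slice [9::10], flatten with a nested comprehension.
-- hand-ported: xs[9::10] = head-then-drop-9 recursion on xs.drop 9 (exact for step 10)
def pvStride10 : List (List String) → List (List String)
  | [] => []
  | x :: xs => x :: pvStride10 (xs.drop 9)
termination_by xs => xs.length
decreasing_by simp

def ligneSur10_alt (fichier : List (List String)) : List String :=
  (pvStride10 (fichier.drop 9)).flatMap (fun line => line)

-- ===== PRECONDITION & SPEC =====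
def Spec_ligneSur10 (fichier : List (List String)) (out : List String) : Prop := out = ligneSur10_alt fichier
instance (fichier : List (List String)) (out : List String) : Decidable (Spec_ligneSur10 fichier out) := by unfold Spec_ligneSur10; infer_instance

-- ===== CLAIM (what is proved, stated in full; the proofs are below) =====
def Claim_equal_ligneSur10 : Prop := ∀ (fichier : List (List String)), Dom_ligneSur10 fichier → Spec_ligneSur10 fichier (ligneSur10 fichier)

-- ===== LEMMAS AND PROOFS =====
def pvSel (k : Nat) : List (List String) → List String
  | [] => []
  | x :: xs => if k % 10 == 0 then x ++ pvSel (k + 1) xs else pvSel (k + 1) xs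

theorem pvFoldl_eq_sel (xs : List (List String)) : ∀ (k : Nat) (acc : List String),
    (xs.foldl
      (fun (st : Nat × List String) ligne =>
        (st.1 + 1, if st.1 % 10 == 0 then st.2 ++ ligne else st.2))
      (k, acc)).2 = acc ++ pvSel k xs := by
  induction xs with
  | nil => intro k acc; simp [pvSel]
  | cons x xs ih =>
    intro k acc
    simp only [List.foldl_cons, pvSel]
    by_cases h : k % 10 = 0
    · have h' := ih (k + 1) (acc ++ x)
      simp [h]
      simp at h'
      rw [h']
    · have h' := ih (k + 1) acc
      simp [h]
      simp at h'
      exact h'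

theorem pvStride10_nil : pvStride10 [] = [] := by simp only [pvStride10]

theorem pvStride10_cons (x : List String) (xs : List (List String)) :
    pvStride10 (x :: xs) = x :: pvStride10 (xs.drop 9) := by simp only [pvStride10]

theorem pvSel_eq_stride (xs : List (List String)) : ∀ (k : Nat),
    pvSel k xs = (pvStride10 (xs.drop ((10 - k % 10) % 10))).flatMap (fun line => line) := by
  induction xs with
  | nil => intro k; simp [pvSel, List.drop_nil, pvStride10_nil]
  | cons x xs ih =>
    intro k
    by_cases h : k % 10 = 0
    · have h1 : (10 - k % 10) % 10 = 0 := by omega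
      have h2 : (10 - (k + 1) % 10) % 10 = 9 := by omega
      simp [pvSel, h, ih (k + 1), h2, pvStride10_cons]
    · have hr : 1 ≤ k % 10 ∧ k % 10 ≤ 9 := by omega
      have h1 : (10 - k % 10) % 10 = 10 - k % 10 := by omega
      have h2 : (10 - (k + 1) % 10) % 10 = 10 - k % 10 - 1 := by omega
      obtain ⟨m, hm⟩ : ∃ m, 10 - k % 10 = m + 1 := ⟨10 - k % 10 - 1, by omega⟩
      have hd : (x :: xs).drop ((10 - k % 10) % 10) = xs.drop (10 - k % 10 - 1) := by
        rw [h1, hm, List.drop_succ_cons]; congr 1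
      simp [pvSel, h, hd, ih (k + 1), h2]

-- ===== VERDICT (by name: the statement is the Claim_ definition above) =====
theorem ligneSur10_spec : Claim_equal_ligneSur10 := by
  intro fichier _
  unfold Spec_ligneSur10 ligneSur10 ligneSur10_alt
  rw [pvFoldl_eq_sel, pvSel_eq_stride]
  simp
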